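-- pv_equiv track=rewrite | github.com/mohammed-Shifas/delivery-intelligence-system | scripts/data_simulator.py | make_names
-- ===== SOURCE A (Python) =====
-- PREFIXES = ["Al Faris","Buraq","Emirates","Gulf","Desert","Al Noor","Falcon",
--             "Al Majd","Pearl","Oasis","Al Safa","Crescent","Horizon","Al Amin",
--             "Sunrise","Al Waha","Prime","Al Reem","Velocity","Metro",
--             "Al Baraka","Swift","Apex","Zenith"]
--
-- SUFFIXES = ["Delivery","Logistics","Riders","Fleet","Express",
--             "Operations","Transport","Services","Solutions","Dispatch"]
--
-- def make_names(n):
--     names, idx = [], 0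
--     while len(names) < n:
--         p = PREFIXES[idx % len(PREFIXES)]
--         s = SUFFIXES[(idx // len(PREFIXES)) % len(SUFFIXES)]
--         num = idx // (len(PREFIXES)*len(SUFFIXES)) + 1
--         name = f"{p} {s}" if num==1 else f"{p} {s} {num}"
--         if name not in names: names.append(name)
--         idx += 1
--     return names
-- ===== SOURCE B (Python) =====
-- PREFIXES = ["Al Faris","Buraq","Emirates","Gulf","Desert","Al Noor","Falcon",
--             "Al Majd","Pearl","Oasis","Al Safa","Crescent","Horizon","Al Amin",
--             "Sunrise","Al Waha","Prime","Al Reem","Velocity","Metro",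
--             "Al Baraka","Swift","Apex","Zenith"]
--
-- SUFFIXES = ["Delivery","Logistics","Riders","Fleet","Express",
--             "Operations","Transport","Services","Solutions","Dispatch"]
--
-- def make_names(n):
--     # Preallocate whole numbered blocks of 240 (suffix-major, prefix-minor,
--     # matching the enumeration order), fill by index, cut to length n: O(n),
--     # no membership scan (generated names are distinct by construction) and
--     # no incremental list reallocation.
--     if n <= 0:
--         return []
--     blocks = (n + 239) // 240
--     names = [""] * (240 * blocks)
--     i = 0
--     for num in range(1, blocks + 1):
--         for s in SUFFIXES:
--             for p in PREFIXES:
--                 names[i] = f"{p} {s}" if num == 1 else f"{p} {s} {num}"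
--                 i += 1
--     del names[n:]
--     return names
-- ===== Notes on version B (the rewrite author's own statement) =====
-- stated objective: faster
-- what changed: B preallocates the exact number of 240-name blocks and fills the slots by index with nested number/suffix/prefix loops, then cuts to n, instead of A's per-index mod/div arithmetic with an O(n) membership scan per name (provably dead, since all generated names are distinct).
import Mathlib
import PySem

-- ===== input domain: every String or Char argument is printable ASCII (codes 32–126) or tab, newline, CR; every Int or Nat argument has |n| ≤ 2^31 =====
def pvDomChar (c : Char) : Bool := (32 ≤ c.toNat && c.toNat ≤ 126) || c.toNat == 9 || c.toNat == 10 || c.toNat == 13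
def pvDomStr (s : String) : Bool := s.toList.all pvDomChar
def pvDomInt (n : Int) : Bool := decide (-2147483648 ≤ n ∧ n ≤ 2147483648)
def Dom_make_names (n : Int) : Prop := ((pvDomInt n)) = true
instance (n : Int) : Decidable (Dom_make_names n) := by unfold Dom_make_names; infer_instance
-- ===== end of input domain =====

-- B preallocates the exact number of 240-name blocks and fills them by index with
-- nested number/suffix/prefix loops, instead of A's per-index mod/div arithmetic with
-- a linear membership scan per name; asymptotically faster (O(n) vs O(n^2)); same return value, proved below.


-- ===== PORT A =====
def PREFIXES : List String := ["Al Faris","Buraq","Emirates","Gulf","Desert","Al Noor","Falcon",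
  "Al Majd","Pearl","Oasis","Al Safa","Crescent","Horizon","Al Amin",
  "Sunrise","Al Waha","Prime","Al Reem","Velocity","Metro",
  "Al Baraka","Swift","Apex","Zenith"]

def SUFFIXES : List String := ["Delivery","Logistics","Riders","Fleet","Express",
  "Operations","Transport","Services","Solutions","Dispatch"]

-- A's while loop, step for step; the fuel parameter only makes the recursion total:
-- n.toNat iterations always suffice, because the membership test never fires (proved
-- below), so each iteration appends one name and the loop stops when len(names) = n.
def make_names_loop (n : Int) (names : List String) (idx : Int) : Nat → List String
  | 0 => names
  | fuel + 1 =>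
    if (names.length : Int) < n then
      let p := (PySem.List.pyGet? PREFIXES (PySem.Int.mod idx (PREFIXES.length : Int))).getD ""
      let s := (PySem.List.pyGet? SUFFIXES (PySem.Int.mod (PySem.Int.floordiv idx (PREFIXES.length : Int)) (SUFFIXES.length : Int))).getD ""
      let num := PySem.Int.floordiv idx ((PREFIXES.length : Int) * (SUFFIXES.length : Int)) + 1
      let name := if num = 1 then p ++ " " ++ s else p ++ " " ++ s ++ " " ++ PySem.Int.toStr num
      make_names_loop n (if name ∈ names then names else names ++ [name]) (idx + 1) fuel
    else names

def make_names (n : Int) : List String := make_names_loop n [] 0 n.toNat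

-- ===== PORT B =====
def make_names_alt (n : Int) : List String :=
  if n ≤ 0 then []
  else
    let blocks := PySem.Int.floordiv (n + 239) 240
    -- names = [""] * (240 * blocks)
    let init := PySem.List.pyRepeat [""] (240 * blocks)
    -- for num in range(1, blocks+1): for s in SUFFIXES: for p in PREFIXES: names[i] = …; i += 1
    -- (the written index i is always in range, so the IndexError-aware pySetD never defaults)
    let st := (PySem.List.pyRange 1 (blocks + 1) 1).foldl (fun (st : List String × Int) num =>
      SUFFIXES.foldl (fun st s =>
        PREFIXES.foldl (fun (st : List String × Int) p =>
          (PySem.List.pySetD st.1 st.2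
            (if num = 1 then p ++ " " ++ s else p ++ " " ++ s ++ " " ++ PySem.Int.toStr num),
           st.2 + 1)) st) st) (init, 0)
    -- del names[n:]
    st.1.take n.toNat

-- ===== PRECONDITION & SPEC =====
def Spec_make_names (n : Int) (out : List String) : Prop := out = make_names_alt n
instance (n : Int) (out : List String) : Decidable (Spec_make_names n out) := by unfold Spec_make_names; infer_instance

-- ===== CLAIM (what is proved, stated in full; the proofs are below) =====
def Claim_equal_make_names : Prop := ∀ (n : Int), Dom_make_names n → Spec_make_names n (make_names n)

-- ===== LEMMAS AND PROOFS =====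

-- the 240 "base" names (number 1), in emission order
def bases : List String := SUFFIXES.flatMap (fun s => PREFIXES.map (fun p => p ++ " " ++ s))

-- the i-th name both programs emit
def nameAt (i : Nat) : String :=
  if i < 240 then bases.getD i ""
  else bases.getD (i % 240) "" ++ " " ++ PySem.Int.toStr ((i / 240 : Nat) + 1)

set_option maxRecDepth 10000 in
theorem bases_length : bases.length = 240 := by decide

set_option maxRecDepth 10000 in
theorem bases_nodup : bases.Nodup := by decide

-- every base name is nonempty and ends in a non-digit character
set_option maxRecDepth 10000 in
theorem bases_last_not_digit :
    bases.all (fun b => (b.toList.getLast?.map (fun c => !c.isDigit)).getD false) = true := by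
  decide

theorem toStr_pos_toList (k : Nat) :
    (PySem.Int.toStr ((k : Int) + 1)).toList = Nat.toDigits 10 (k + 1) := by
  rw [PySem.Int.toList_toStr]
  simp [PySem.Int.toChars]
  omega

theorem digitChar_inj : ∀ a < 10, ∀ b < 10, Nat.digitChar a = Nat.digitChar b → a = b := by
  decide

theorem toDigits10_inj : ∀ (a b : Nat), Nat.toDigits 10 a = Nat.toDigits 10 b → a = b := by
  intro a
  induction a using Nat.strong_induction_on with
  | _ a ih =>
    intro b h
    have hlen := congrArg List.length h
    rcases Nat.lt_or_ge a 10 with ha | ha <;> rcases Nat.lt_or_ge b 10 with hb | hb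
    · rw [Nat.toDigits_of_lt_base ha, Nat.toDigits_of_lt_base hb] at h
      simp at h
      exact digitChar_inj a ha b hb h
    · rw [Nat.toDigits_of_lt_base ha] at hlen
      have : (Nat.toDigits 10 b).length ≤ 1 := by simp at hlen; omega
      have := (Nat.length_toDigits_le_iff (by norm_num) (by norm_num)).mp this
      simp at this; omega
    · rw [Nat.toDigits_of_lt_base hb] at hlen
      have : (Nat.toDigits 10 a).length ≤ 1 := by simp at hlen; omega
      have := (Nat.length_toDigits_le_iff (by norm_num) (by norm_num)).mp this
      simp at this; omega
    · rw [Nat.toDigits_eq_if (by norm_num) (n := a), Nat.toDigits_eq_if (by norm_num) (n := b)] at h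
      rw [if_neg (by omega), if_neg (by omega)] at h
      rw [← List.concat_eq_append, ← List.concat_eq_append, List.concat_inj] at h
      obtain ⟨h1, h2⟩ := h
      have hq : a / 10 = b / 10 := ih (a / 10) (by omega) _ h1
      have hr : a % 10 = b % 10 :=
        digitChar_inj _ (Nat.mod_lt a (by norm_num)) _ (Nat.mod_lt b (by norm_num)) h2
      omega

theorem split_at_space : ∀ (a₁ a₂ d₁ d₂ : List Char),
    (∀ c ∈ d₁, c.isDigit = true) → (∀ c ∈ d₂, c.isDigit = true) →
    a₁ ++ ' ' :: d₁ = a₂ ++ ' ' :: d₂ → a₁ = a₂ ∧ d₁ = d₂ := by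
  intro a₁
  induction a₁ with
  | nil =>
    intro a₂ d₁ d₂ h₁ h₂ h
    cases a₂ with
    | nil => simpa using h
    | cons c a₂' =>
      rw [List.nil_append, List.cons_append, List.cons.injEq] at h
      have hm : (' ' : Char) ∈ d₁ := by rw [h.2]; simp
      exact absurd (h₁ _ hm) (by decide)
  | cons c a₁' ih =>
    intro a₂ d₁ d₂ h₁ h₂ h
    cases a₂ with
    | nil =>
      rw [List.nil_append, List.cons_append, List.cons.injEq] at h
      have hm : (' ' : Char) ∈ d₂ := by rw [← h.2]; simp
      exact absurd (h₂ _ hm) (by decide)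
    | cons c' a₂' =>
      rw [List.cons_append, List.cons_append, List.cons.injEq] at h
      obtain ⟨h1, h2⟩ := ih a₂' d₁ d₂ h₁ h₂ h.2
      exact ⟨by rw [h.1, h1], h2⟩

theorem flatMap_map_getElem {α β γ : Type} [Inhabited α] [Inhabited β] (g : α → β → γ) :
    ∀ (l₁ : List α) (l₂ : List β) (j : Nat), j < l₁.length * l₂.length →
    (l₁.flatMap fun a => l₂.map (g a))[j]? = some (g l₁[j / l₂.length]! l₂[j % l₂.length]!) := by
  intro l₁
  induction l₁ with
  | nil => intro l₂ j h; simp at h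
  | cons a l₁' ih =>
    intro l₂ j h
    by_cases hj : j < l₂.length
    · rw [List.flatMap_cons, List.getElem?_append_left (by simpa using hj)]
      rw [Nat.div_eq_of_lt hj, Nat.mod_eq_of_lt hj]
      simp [List.getElem!_eq_getElem?_getD, List.getElem?_eq_getElem hj]
    · rw [Nat.not_lt] at hj
      have hpos : 0 < l₂.length := by
        rcases Nat.eq_zero_or_pos l₂.length with h0 | h0
        · simp [h0] at h
        · exact h0
      obtain ⟨r, rfl⟩ : ∃ r, j = r + l₂.length := ⟨j - l₂.length, by omega⟩
      rw [List.flatMap_cons, List.getElem?_append_right (by simp)]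
      simp only [List.length_map, Nat.add_sub_cancel]
      have hlt : r < l₁'.length * l₂.length := by simp at h; nlinarith
      rw [ih l₂ r hlt]
      rw [Nat.add_div_right r hpos, Nat.add_mod_right r]
      simp [List.getElem!_eq_getElem?_getD]

theorem PREF_len : PREFIXES.length = 24 := by decide
theorem SUF_len : SUFFIXES.length = 10 := by decide

theorem base_getD (r : Nat) (hr : r < 240) :
    bases.getD r "" = PREFIXES[r % 24]! ++ " " ++ SUFFIXES[r / 24]! := by
  have h := flatMap_map_getElem (fun s p => p ++ " " ++ s) SUFFIXES PREFIXES r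
    (by rw [PREF_len, SUF_len]; omega)
  rw [List.getD_eq_getElem?_getD]
  show (SUFFIXES.flatMap fun s => PREFIXES.map (fun p => p ++ " " ++ s))[r]?.getD "" = _
  rw [h, PREF_len]
  simp

-- membership and digit facts for the numeral tail
theorem tail_digits (k : Nat) : ∀ c ∈ (PySem.Int.toStr ((k : Int) + 1)).toList, c.isDigit = true := by
  rw [toStr_pos_toList]
  intro c hc
  exact Nat.isDigit_of_mem_toDigits (by norm_num) (by norm_num) hc

theorem tail_ne_nil (k : Nat) : (PySem.Int.toStr ((k : Int) + 1)).toList ≠ [] := by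
  rw [toStr_pos_toList]
  have := Nat.length_toDigits_pos (b := 10) (n := k + 1)
  intro h; rw [h] at this; simp at this

theorem base_last (r : Nat) (hr : r < 240) :
    ((bases.getD r "").toList.getLast?.map (fun c => !c.isDigit)).getD false = true := by
  have hm : bases.getD r "" ∈ bases := by
    rw [List.getD_eq_getElem?_getD, List.getElem?_eq_getElem (by rw [bases_length]; omega)]
    simp [List.getElem_mem]
  exact List.all_eq_true.mp bases_last_not_digit _ hm

theorem base_last_not_digit' (r : Nat) (_hr : r < 240) :
    ∀ c, (bases.getD r "").toList.getLast? = some c → c.isDigit = false := by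
  intro c hc
  have := base_last r _hr
  rw [hc] at this
  simpa using this

-- a name of the numbered form cannot equal a base name
theorem mixed_ne (r k j : Nat) (_hr : r < 240) (hj : j < 240) :
    bases.getD j "" ≠ bases.getD r "" ++ " " ++ PySem.Int.toStr ((k : Int) + 1) := by
  intro h
  have htl := congrArg String.toList h
  rw [String.toList_append, String.toList_append] at htl
  have hsp : (" " : String).toList = [' '] := rfl
  rw [hsp] at htl
  obtain ⟨c, hc⟩ : ∃ c, (PySem.Int.toStr ((k : Int) + 1)).toList.getLast? = some c :=
    Option.isSome_iff_exists.mp (List.getLast?_isSome.mpr (tail_ne_nil k))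
  have hlast := congrArg List.getLast? htl
  rw [List.getLast?_append, List.getLast?_append, hc, Option.some_or] at hlast
  have h1 := base_last_not_digit' j hj c hlast
  have h2 := tail_digits k c (List.mem_of_getLast? hc)
  rw [h1] at h2
  exact Bool.false_ne_true h2

theorem base_inj (r₁ r₂ : Nat) (h₁ : r₁ < 240) (h₂ : r₂ < 240)
    (h : bases.getD r₁ "" = bases.getD r₂ "") : r₁ = r₂ := by
  rw [List.getD_eq_getElem?_getD, List.getD_eq_getElem?_getD,
    List.getElem?_eq_getElem (by rw [bases_length]; omega),
    List.getElem?_eq_getElem (by rw [bases_length]; omega)] at h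
  simp only [Option.getD_some] at h
  exact (List.Nodup.getElem_inj_iff bases_nodup).mp h

theorem nameAt_inj (i j : Nat) (h : nameAt i = nameAt j) : i = j := by
  unfold nameAt at h
  by_cases hi : i < 240 <;> by_cases hj : j < 240
  · rw [if_pos hi, if_pos hj] at h
    exact base_inj i j hi hj h
  · rw [if_pos hi, if_neg hj] at h
    exact absurd h (mixed_ne (j % 240) (j / 240) i (by omega) hi)
  · rw [if_neg hi, if_pos hj] at h
    exact absurd h.symm (mixed_ne (i % 240) (i / 240) j (by omega) hj)
  · rw [if_neg hi, if_neg hj] at h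
    have htl := congrArg String.toList h
    rw [String.toList_append, String.toList_append, String.toList_append,
      String.toList_append] at htl
    have hsp : (" " : String).toList = [' '] := rfl
    rw [hsp, List.append_assoc, List.singleton_append, List.append_assoc,
      List.singleton_append] at htl
    obtain ⟨hb, ht⟩ := split_at_space _ _ _ _ (tail_digits (i / 240)) (tail_digits (j / 240)) htl
    have hr : i % 240 = j % 240 :=
      base_inj _ _ (by omega) (by omega) (String.toList_inj.mp hb)
    have hq : i / 240 = j / 240 := by
      have := toDigits10_inj (i / 240 + 1) (j / 240 + 1) (by
        rw [← toStr_pos_toList, ← toStr_pos_toList, ht])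
      omega
    omega

theorem pyget_mod (l : List String) (m : Nat) (hm : l.length = m) (h0 : 0 < m) (i : Nat) :
    (PySem.List.pyGet? l (PySem.Int.mod (i : Int) (l.length : Int))).getD "" = l[i % m]! := by
  subst hm
  rw [PySem.Int.mod_natCast, PySem.List.pyGet?_natCast,
    List.getElem?_eq_getElem (Nat.mod_lt _ h0)]
  simp [List.getElem!_eq_getElem?_getD, List.getElem?_eq_getElem (Nat.mod_lt _ h0)]

theorem bodyName (i : Nat) :
    (if (PySem.Int.floordiv (i : Int) ((PREFIXES.length : Int) * (SUFFIXES.length : Int)) + 1) = 1 then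
       (PySem.List.pyGet? PREFIXES (PySem.Int.mod (i : Int) (PREFIXES.length : Int))).getD "" ++ " " ++
       (PySem.List.pyGet? SUFFIXES (PySem.Int.mod (PySem.Int.floordiv (i : Int) (PREFIXES.length : Int)) (SUFFIXES.length : Int))).getD ""
     else
       (PySem.List.pyGet? PREFIXES (PySem.Int.mod (i : Int) (PREFIXES.length : Int))).getD "" ++ " " ++
       (PySem.List.pyGet? SUFFIXES (PySem.Int.mod (PySem.Int.floordiv (i : Int) (PREFIXES.length : Int)) (SUFFIXES.length : Int))).getD "" ++ " " ++
       PySem.Int.toStr (PySem.Int.floordiv (i : Int) ((PREFIXES.length : Int) * (SUFFIXES.length : Int)) + 1)) = nameAt i := by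
  have hp : (PySem.List.pyGet? PREFIXES (PySem.Int.mod (i : Int) (PREFIXES.length : Int))).getD ""
      = PREFIXES[i % 24]! := pyget_mod PREFIXES 24 PREF_len (by norm_num) i
  have hfd : PySem.Int.floordiv (i : Int) (PREFIXES.length : Int) = ((i / 24 : Nat) : Int) := by
    rw [PREF_len, PySem.Int.floordiv_natCast]
  have hs : (PySem.List.pyGet? SUFFIXES (PySem.Int.mod (PySem.Int.floordiv (i : Int) (PREFIXES.length : Int)) (SUFFIXES.length : Int))).getD ""
      = SUFFIXES[(i / 24) % 10]! := by
    rw [hfd]; exact pyget_mod SUFFIXES 10 SUF_len (by norm_num) (i / 24)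
  have hmul : (PREFIXES.length : Int) * (SUFFIXES.length : Int) = ((240 : Nat) : Int) := by
    rw [PREF_len, SUF_len]; norm_num
  have hnum : PySem.Int.floordiv (i : Int) ((PREFIXES.length : Int) * (SUFFIXES.length : Int)) + 1
      = ((i / 240 : Nat) : Int) + 1 := by
    rw [hmul, PySem.Int.floordiv_natCast]
  rw [hp, hs, hnum]
  unfold nameAt
  by_cases hi : i < 240
  · have h1 : ((i / 240 : Nat) : Int) + 1 = 1 := by
      have h0 : i / 240 = 0 := by omega
      simp [h0]
    rw [if_pos h1, if_pos hi, base_getD i hi, Nat.mod_eq_of_lt (by omega : i / 24 < 10)]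
  · have h1 : ((i / 240 : Nat) : Int) + 1 ≠ 1 := by
      have h0 : 0 < i / 240 := by omega
      omega
    rw [if_neg h1, if_neg hi, base_getD (i % 240) (by omega),
      Nat.mod_mod_of_dvd i (by norm_num : (24:Nat) ∣ 240),
      show i % 240 / 24 = i / 24 % 10 by omega]

theorem loopA_inv : ∀ (fuel i : Nat) (n : Int), i ≤ n.toNat → n.toNat ≤ i + fuel →
    make_names_loop n ((List.range i).map nameAt) (i : Int) fuel = (List.range n.toNat).map nameAt := by
  intro fuel
  induction fuel with
  | zero =>
    intro i n h1 h2
    have : i = n.toNat := by omega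
    rw [this, make_names_loop]
  | succ fuel ih =>
    intro i n h1 h2
    rw [make_names_loop]
    by_cases hc : (i : Int) < n
    · rw [if_pos (by simpa using hc)]
      simp only []
      rw [bodyName i]
      have hmem : nameAt i ∉ (List.range i).map nameAt := by
        intro hm
        obtain ⟨j, hj, hje⟩ := List.mem_map.mp hm
        have := nameAt_inj j i hje
        rw [this] at hj
        exact absurd (List.mem_range.mp hj) (lt_irrefl i)
      rw [if_neg hmem,
        show List.map nameAt (List.range i) ++ [nameAt i] = List.map nameAt (List.range (i+1)) by
          rw [List.range_succ]; simp,
        show ((i : Int) + 1) = ((i + 1 : Nat) : Int) by push_cast; ring]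
      exact ih (i + 1) n (by omega) (by omega)
    · rw [if_neg (by simpa using hc)]
      have : i = n.toNat := by omega
      rw [this]

-- writing a run of values at successive indices into preallocated slots
theorem write_run {α : Type} (f : α → String) :
    ∀ (l : List α) (done : List String) (k : Nat), l.length ≤ k →
    l.foldl (fun (st : List String × Int) a => (PySem.List.pySetD st.1 st.2 (f a), st.2 + 1))
      (done ++ List.replicate k "", (done.length : Int))
    = (done ++ l.map f ++ List.replicate (k - l.length) "", (done.length : Int) + l.length) := by
  intro l
  induction l with
  | nil => intro done k _; simp
  | cons a l' ih =>
    intro done k hk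
    have hk' : l'.length + 1 ≤ k := by simpa using hk
    obtain ⟨k', rfl⟩ : ∃ k', k = k' + 1 := ⟨k - 1, by omega⟩
    rw [List.foldl_cons]
    have hset : PySem.List.pySetD (done ++ List.replicate (k' + 1) "") ((done.length : Int)) (f a)
        = (done ++ [f a]) ++ List.replicate k' "" := by
      rw [PySem.List.pySetD_natCast, List.replicate_succ,
        List.set_append_right _ _ (le_refl _), Nat.sub_self]
      simp
    rw [hset]
    have hlen : ((done ++ [f a]).length : Int) = (done.length : Int) + 1 := by
      simp
    have := ih (done ++ [f a]) k' (by omega)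
    rw [hlen] at this
    rw [this, Prod.mk.injEq]
    simp only [List.map_cons, List.length_cons]
    constructor
    · simp [List.append_assoc]
    · push_cast; ring

-- the nested suffix/prefix loops write one whole block
theorem write_block {α β : Type} (g : α → β → String) :
    ∀ (l₁ : List α) (l₂ : List β) (done : List String) (k : Nat), l₁.length * l₂.length ≤ k →
    l₁.foldl (fun st a => l₂.foldl (fun (st : List String × Int) b =>
        (PySem.List.pySetD st.1 st.2 (g a b), st.2 + 1)) st)
      (done ++ List.replicate k "", (done.length : Int))
    = (done ++ (l₁.flatMap fun a => l₂.map (g a)) ++ List.replicate (k - l₁.length * l₂.length) "",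
       (done.length : Int) + l₁.length * l₂.length) := by
  intro l₁
  induction l₁ with
  | nil => intro l₂ done k _; simp
  | cons a l₁' ih =>
    intro l₂ done k hk
    rw [List.foldl_cons]
    have hk' : (l₁'.length + 1) * l₂.length ≤ k := by simpa using hk
    have hmul : (l₁'.length + 1) * l₂.length = l₁'.length * l₂.length + l₂.length := by ring
    have hinner := write_run (g a) l₂ done k (by nlinarith)
    rw [hinner]
    have hlen : ((done ++ l₂.map (g a)).length : Int) = (done.length : Int) + l₂.length := by
      simp
    have := ih l₂ (done ++ l₂.map (g a)) (k - l₂.length) (by omega)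
    rw [hlen] at this
    rw [this, Prod.mk.injEq]
    simp only [List.length_cons]
    constructor
    · simp only [List.flatMap_cons, List.append_assoc]
      congr 4
      omega
    · push_cast; ring

-- the b-th block's contents are names 240*b .. 240*b+239
set_option maxRecDepth 10000 in
theorem block_eq (b : Nat) :
    (SUFFIXES.flatMap fun s => PREFIXES.map fun p =>
        if ((b : Int) + 1) = 1 then p ++ " " ++ s
        else p ++ " " ++ s ++ " " ++ PySem.Int.toStr ((b : Int) + 1))
      = (List.range 240).map (fun j => nameAt (240 * b + j)) := by
  by_cases hb : b = 0
  · subst hb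
    simp only [Nat.cast_zero, zero_add, eq_self_iff_true, if_true]
    apply List.ext_getElem
    · simp [SUFFIXES, PREFIXES]
    · intro j hj hj'
      have hj240 : j < 240 := by simpa using hj'
      have h := flatMap_map_getElem (fun s p => p ++ " " ++ s) SUFFIXES PREFIXES j
        (by rw [PREF_len, SUF_len]; omega)
      rw [List.getElem?_eq_getElem hj] at h
      simp only [Option.some.injEq] at h
      rw [h]
      simp only [List.getElem_map, List.getElem_range]
      rw [show 240 * 0 + j = j by omega]
      rw [nameAt, if_pos hj240, base_getD j hj240, PREF_len]
  · have hne : ¬ ((b : Int) + 1 = 1) := by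
      intro h
      have : (b : Int) = 0 := by omega
      exact hb (by exact_mod_cast this)
    simp only [if_neg hne]
    apply List.ext_getElem
    · simp [SUFFIXES, PREFIXES]
    · intro j hj hj'
      have hj240 : j < 240 := by simpa using hj'
      have h := flatMap_map_getElem
        (fun s p => p ++ " " ++ s ++ " " ++ PySem.Int.toStr ((b : Int) + 1)) SUFFIXES PREFIXES j
        (by rw [PREF_len, SUF_len]; omega)
      rw [List.getElem?_eq_getElem hj] at h
      simp only [Option.some.injEq] at h
      rw [h]
      simp only [List.getElem_map, List.getElem_range]
      rw [nameAt, if_neg (by omega), PREF_len,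
        show (240 * b + j) % 240 = j by omega,
        show (240 * b + j) / 240 = b by omega,
        base_getD j hj240]

-- running the outer loop over the remaining r block numbers fills everything
theorem fill_blocks : ∀ (r b : Nat),
    (PySem.List.pyRange ((b : Int) + 1) ((b : Int) + 1 + r) 1).foldl
      (fun (st : List String × Int) num =>
        SUFFIXES.foldl (fun st s =>
          PREFIXES.foldl (fun (st : List String × Int) p =>
            (PySem.List.pySetD st.1 st.2
              (if num = 1 then p ++ " " ++ s else p ++ " " ++ s ++ " " ++ PySem.Int.toStr num),
             st.2 + 1)) st) st)
      ((List.range (240 * b)).map nameAt ++ List.replicate (240 * r) "", ((240 * b : Nat) : Int))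
    = ((List.range (240 * (b + r))).map nameAt, ((240 * (b + r) : Nat) : Int)) := by
  intro r
  induction r with
  | zero =>
    intro b
    rw [PySem.List.pyRange_one_eq_nil (by omega)]
    simp
  | succ r ih =>
    intro b
    rw [PySem.List.pyRange_one_cons (by push_cast; omega), List.foldl_cons]
    have hdl : ((List.range (240 * b)).map nameAt).length = 240 * b := by simp
    have hstep := write_block
      (fun s p => if ((b : Int) + 1) = 1 then p ++ " " ++ s
                  else p ++ " " ++ s ++ " " ++ PySem.Int.toStr ((b : Int) + 1))
      SUFFIXES PREFIXES ((List.range (240 * b)).map nameAt) (240 * (r + 1))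
      (by rw [PREF_len, SUF_len]; omega)
    rw [hdl] at hstep
    rw [hstep, block_eq b]
    have hmerge : (List.range (240 * b)).map nameAt
        ++ (List.range 240).map (fun j => nameAt (240 * b + j))
        = (List.range (240 * (b + 1))).map nameAt := by
      rw [show 240 * (b + 1) = 240 * b + 240 by ring, List.range_add, List.map_append, List.map_map]
      rfl
    rw [PREF_len, SUF_len,
      show 240 * (r + 1) - 10 * 24 = 240 * r by omega, hmerge]
    have harg : ((240 * b : Nat) : Int) + (10 : Nat) * (24 : Nat) = ((240 * (b + 1) : Nat) : Int) := by
      push_cast; ring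
    rw [harg]
    have hrange : PySem.List.pyRange ((b : Int) + 1 + 1) ((b : Int) + 1 + (r + 1 : Nat)) 1
        = PySem.List.pyRange (((b + 1 : Nat) : Int) + 1) (((b + 1 : Nat) : Int) + 1 + (r : Nat)) 1 := by
      congr 1 <;> push_cast <;> ring
    rw [hrange, ih (b + 1), show b + 1 + r = b + (r + 1) by ring]

theorem alt_eq (n : Int) : make_names_alt n = (List.range n.toNat).map nameAt := by
  unfold make_names_alt
  by_cases hn : n ≤ 0
  · rw [if_pos hn, show n.toNat = 0 by omega]
    simp
  · rw [if_neg hn]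
    have h240 : PySem.Int.floordiv (n + 239) 240 = (n + 239) / 240 :=
      PySem.Int.floordiv_eq_ediv_of_pos (by norm_num)
    obtain ⟨B, hB⟩ : ∃ B : Nat, PySem.Int.floordiv (n + 239) 240 = (B : Int) :=
      ⟨(PySem.Int.floordiv (n + 239) 240).toNat, by rw [h240]; omega⟩
    have hcov : n.toNat ≤ 240 * B := by
      rw [h240] at hB
      omega
    rw [hB]
    have hrep : PySem.List.pyRepeat ([""] : List String) (240 * (B : Int))
        = List.replicate (240 * B) "" := by
      rw [PySem.List.pyRepeat_singleton,
        show (240 * (B : Int)).toNat = 240 * B by omega]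
    have hr : PySem.List.pyRange 1 ((B : Int) + 1) 1
        = PySem.List.pyRange (((0 : Nat) : Int) + 1) (((0 : Nat) : Int) + 1 + (B : Nat)) 1 := by
      congr 1
      push_cast
      ring
    simp only [hrep, hr]
    have hstart : (List.replicate (240 * B) "", (0 : Int))
        = ((List.range (240 * 0)).map nameAt ++ List.replicate (240 * B) "", ((240 * 0 : Nat) : Int)) := by
      simp
    rw [hstart, fill_blocks B 0]
    simp only [Nat.zero_add]
    rw [← List.map_take, List.take_range, Nat.min_eq_left hcov]

theorem ports_agree (n : Int) : make_names n = make_names_alt n := by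
  have hA := loopA_inv n.toNat 0 n (by omega) (by omega)
  simp only [List.range_zero, List.map_nil, Nat.cast_zero] at hA
  rw [make_names, hA, alt_eq]

-- ===== VERDICT (by name: the statement is the Claim_ definition above) =====
theorem make_names_spec : Claim_equal_make_names := by
  intro n _
  unfold Spec_make_names
  exact ports_agree n
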